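-- pv_equiv track=rewrite | github.com/Kirito0098/AdminAntizapret | core/services/cidr_list_updater.py | _country_strict_geo_buckets
-- ===== SOURCE A (Python) =====
-- STRICT_GEO_BUCKET_SCOPES = (
--     "europe",
--     "north-america",
--     "central-america",
--     "south-america",
--     "asia-east",
--     "asia-south",
--     "asia-southeast",
--     "oceania",
--     "middle-east",
--     "africa",
-- )
--
-- COUNTRY_CODES_BY_SCOPE = {
--     "europe": {
--         "AD", "AL", "AM", "AT", "AZ", "BA", "BE", "BG", "BY", "CH", "CY", "CZ", "DE", "DK", "EE",
--         "ES", "FI", "FO", "FR", "GB", "GE", "GG", "GI", "GR", "HR", "HU", "IE", "IM", "IS", "IT",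
--         "JE", "KZ", "LI", "LT", "LU", "LV", "MC", "MD", "ME", "MK", "MT", "NL", "NO", "PL", "PT",
--         "RO", "RS", "RU", "SE", "SI", "SK", "SM", "TR", "UA", "VA", "XK",
--     },
--     "north-america": {"BM", "CA", "GL", "PM", "US"},
--     "central-america": {"BZ", "CR", "GT", "HN", "MX", "NI", "PA", "SV"},
--     "south-america": {"AR", "BO", "BR", "CL", "CO", "EC", "FK", "GF", "GY", "PE", "PY", "SR", "UY", "VE"},
--     "asia-east": {"CN", "HK", "JP", "KP", "KR", "MN", "MO", "TW"},
--     "asia-south": {"AF", "BD", "BT", "IN", "IR", "LK", "MV", "NP", "PK"},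
--     "asia-southeast": {"BN", "ID", "KH", "LA", "MM", "MY", "PH", "SG", "TH", "TL", "VN"},
--     "oceania": {
--         "AS", "AU", "CK", "FJ", "FM", "GU", "KI", "MH", "MP", "NC", "NF", "NR", "NU", "NZ", "PF",
--         "PG", "PN", "PW", "SB", "TK", "TO", "TV", "VU", "WF", "WS",
--     },
--     "middle-east": {"AE", "BH", "CY", "EG", "IL", "IQ", "IR", "JO", "KW", "LB", "OM", "PS", "QA", "SA", "SY", "TR", "YE"},
--     "africa": {
--         "AO", "BF", "BI", "BJ", "BW", "CD", "CF", "CG", "CI", "CM", "CV", "DJ", "DZ", "EG", "EH", "ER", "ET", "GA",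
--         "GH", "GM", "GN", "GQ", "GW", "KE", "KM", "LR", "LS", "LY", "MA", "MG", "ML", "MR", "MU", "MW", "MZ", "NA",
--         "NE", "NG", "RE", "RW", "SC", "SD", "SH", "SL", "SN", "SO", "SS", "ST", "SZ", "TD", "TG", "TN", "TZ", "UG",
--         "YT", "ZA", "ZM", "ZW",
--     },
--     "china": {"CN", "HK", "MO"},
-- }
--
-- def _normalize_country_code(country_code):
--     return str(country_code or "").strip().upper()
--
-- def _country_strict_geo_buckets(country_code):
--     code = _normalize_country_code(country_code)
--     if not code:
--         return set()
--
--     buckets = set()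
--     for scope in STRICT_GEO_BUCKET_SCOPES:
--         allowed = COUNTRY_CODES_BY_SCOPE.get(scope) or set()
--         if code in allowed:
--             buckets.add(scope)
--     return buckets
-- ===== SOURCE B (Python) =====
-- # B: a single precomputed literal reverse table (country code -> strict scopes in
-- # STRICT_GEO_BUCKET_SCOPES order), so the function is one dict lookup, no scan.
-- GEO_BUCKETS_BY_CODE = {
--     "AD": ("europe",),
--     "AE": ("middle-east",),
--     "AF": ("asia-south",),
--     "AL": ("europe",),
--     "AM": ("europe",),
--     "AO": ("africa",),
--     "AR": ("south-america",),
--     "AS": ("oceania",),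
--     "AT": ("europe",),
--     "AU": ("oceania",),
--     "AZ": ("europe",),
--     "BA": ("europe",),
--     "BD": ("asia-south",),
--     "BE": ("europe",),
--     "BF": ("africa",),
--     "BG": ("europe",),
--     "BH": ("middle-east",),
--     "BI": ("africa",),
--     "BJ": ("africa",),
--     "BM": ("north-america",),
--     "BN": ("asia-southeast",),
--     "BO": ("south-america",),
--     "BR": ("south-america",),
--     "BT": ("asia-south",),
--     "BW": ("africa",),
--     "BY": ("europe",),
--     "BZ": ("central-america",),
--     "CA": ("north-america",),
--     "CD": ("africa",),
--     "CF": ("africa",),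
--     "CG": ("africa",),
--     "CH": ("europe",),
--     "CI": ("africa",),
--     "CK": ("oceania",),
--     "CL": ("south-america",),
--     "CM": ("africa",),
--     "CN": ("asia-east",),
--     "CO": ("south-america",),
--     "CR": ("central-america",),
--     "CV": ("africa",),
--     "CY": ("europe", "middle-east",),
--     "CZ": ("europe",),
--     "DE": ("europe",),
--     "DJ": ("africa",),
--     "DK": ("europe",),
--     "DZ": ("africa",),
--     "EC": ("south-america",),
--     "EE": ("europe",),
--     "EG": ("middle-east", "africa",),
--     "EH": ("africa",),
--     "ER": ("africa",),
--     "ES": ("europe",),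
--     "ET": ("africa",),
--     "FI": ("europe",),
--     "FJ": ("oceania",),
--     "FK": ("south-america",),
--     "FM": ("oceania",),
--     "FO": ("europe",),
--     "FR": ("europe",),
--     "GA": ("africa",),
--     "GB": ("europe",),
--     "GE": ("europe",),
--     "GF": ("south-america",),
--     "GG": ("europe",),
--     "GH": ("africa",),
--     "GI": ("europe",),
--     "GL": ("north-america",),
--     "GM": ("africa",),
--     "GN": ("africa",),
--     "GQ": ("africa",),
--     "GR": ("europe",),
--     "GT": ("central-america",),
--     "GU": ("oceania",),
--     "GW": ("africa",),
--     "GY": ("south-america",),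
--     "HK": ("asia-east",),
--     "HN": ("central-america",),
--     "HR": ("europe",),
--     "HU": ("europe",),
--     "ID": ("asia-southeast",),
--     "IE": ("europe",),
--     "IL": ("middle-east",),
--     "IM": ("europe",),
--     "IN": ("asia-south",),
--     "IQ": ("middle-east",),
--     "IR": ("asia-south", "middle-east",),
--     "IS": ("europe",),
--     "IT": ("europe",),
--     "JE": ("europe",),
--     "JO": ("middle-east",),
--     "JP": ("asia-east",),
--     "KE": ("africa",),
--     "KH": ("asia-southeast",),
--     "KI": ("oceania",),
--     "KM": ("africa",),
--     "KP": ("asia-east",),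
--     "KR": ("asia-east",),
--     "KW": ("middle-east",),
--     "KZ": ("europe",),
--     "LA": ("asia-southeast",),
--     "LB": ("middle-east",),
--     "LI": ("europe",),
--     "LK": ("asia-south",),
--     "LR": ("africa",),
--     "LS": ("africa",),
--     "LT": ("europe",),
--     "LU": ("europe",),
--     "LV": ("europe",),
--     "LY": ("africa",),
--     "MA": ("africa",),
--     "MC": ("europe",),
--     "MD": ("europe",),
--     "ME": ("europe",),
--     "MG": ("africa",),
--     "MH": ("oceania",),
--     "MK": ("europe",),
--     "ML": ("africa",),
--     "MM": ("asia-southeast",),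
--     "MN": ("asia-east",),
--     "MO": ("asia-east",),
--     "MP": ("oceania",),
--     "MR": ("africa",),
--     "MT": ("europe",),
--     "MU": ("africa",),
--     "MV": ("asia-south",),
--     "MW": ("africa",),
--     "MX": ("central-america",),
--     "MY": ("asia-southeast",),
--     "MZ": ("africa",),
--     "NA": ("africa",),
--     "NC": ("oceania",),
--     "NE": ("africa",),
--     "NF": ("oceania",),
--     "NG": ("africa",),
--     "NI": ("central-america",),
--     "NL": ("europe",),
--     "NO": ("europe",),
--     "NP": ("asia-south",),
--     "NR": ("oceania",),
--     "NU": ("oceania",),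
--     "NZ": ("oceania",),
--     "OM": ("middle-east",),
--     "PA": ("central-america",),
--     "PE": ("south-america",),
--     "PF": ("oceania",),
--     "PG": ("oceania",),
--     "PH": ("asia-southeast",),
--     "PK": ("asia-south",),
--     "PL": ("europe",),
--     "PM": ("north-america",),
--     "PN": ("oceania",),
--     "PS": ("middle-east",),
--     "PT": ("europe",),
--     "PW": ("oceania",),
--     "PY": ("south-america",),
--     "QA": ("middle-east",),
--     "RE": ("africa",),
--     "RO": ("europe",),
--     "RS": ("europe",),
--     "RU": ("europe",),
--     "RW": ("africa",),
--     "SA": ("middle-east",),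
--     "SB": ("oceania",),
--     "SC": ("africa",),
--     "SD": ("africa",),
--     "SE": ("europe",),
--     "SG": ("asia-southeast",),
--     "SH": ("africa",),
--     "SI": ("europe",),
--     "SK": ("europe",),
--     "SL": ("africa",),
--     "SM": ("europe",),
--     "SN": ("africa",),
--     "SO": ("africa",),
--     "SR": ("south-america",),
--     "SS": ("africa",),
--     "ST": ("africa",),
--     "SV": ("central-america",),
--     "SY": ("middle-east",),
--     "SZ": ("africa",),
--     "TD": ("africa",),
--     "TG": ("africa",),
--     "TH": ("asia-southeast",),
--     "TK": ("oceania",),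
--     "TL": ("asia-southeast",),
--     "TN": ("africa",),
--     "TO": ("oceania",),
--     "TR": ("europe", "middle-east",),
--     "TV": ("oceania",),
--     "TW": ("asia-east",),
--     "TZ": ("africa",),
--     "UA": ("europe",),
--     "UG": ("africa",),
--     "US": ("north-america",),
--     "UY": ("south-america",),
--     "VA": ("europe",),
--     "VE": ("south-america",),
--     "VN": ("asia-southeast",),
--     "VU": ("oceania",),
--     "WF": ("oceania",),
--     "WS": ("oceania",),
--     "XK": ("europe",),
--     "YE": ("middle-east",),
--     "YT": ("africa",),
--     "ZA": ("africa",),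
--     "ZM": ("africa",),
--     "ZW": ("africa",),
-- }
--
--
-- def _country_strict_geo_buckets(country_code):
--     code = str(country_code or "").strip().upper()
--     if not code:
--         return set()
--     return set(GEO_BUCKETS_BY_CODE.get(code, ()))
-- ===== Notes on version B (the rewrite author's own statement) =====
-- stated objective: alternative
-- what changed: B replaces A's per-call scan over the 10 strict scopes (set-membership test per scope) by a single lookup in a precomputed literal reverse table mapping each country code to the tuple of strict scopes containing it (the extra 'china' key is never indexed).
import Mathlib
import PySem

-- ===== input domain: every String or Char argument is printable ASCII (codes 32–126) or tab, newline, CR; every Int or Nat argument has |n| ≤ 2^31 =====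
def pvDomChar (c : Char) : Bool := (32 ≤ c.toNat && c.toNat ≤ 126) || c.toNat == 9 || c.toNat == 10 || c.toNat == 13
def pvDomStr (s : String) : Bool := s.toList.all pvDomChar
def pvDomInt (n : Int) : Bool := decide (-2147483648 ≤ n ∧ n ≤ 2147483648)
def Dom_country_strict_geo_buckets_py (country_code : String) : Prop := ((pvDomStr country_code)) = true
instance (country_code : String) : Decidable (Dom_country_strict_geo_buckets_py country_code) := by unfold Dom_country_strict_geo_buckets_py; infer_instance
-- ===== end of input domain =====

-- B replaces A's per-call scan over the 10 strict scopes by one lookup in a precomputed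
-- literal reverse table (country code -> scopes containing it); objective: alternative.

-- ===== PORT A =====
-- module constants of A: the tuple of strict scopes and the scope -> set-of-codes dict
def pvScopes : List String :=
  ["europe", "north-america", "central-america", "south-america", "asia-east",
   "asia-south", "asia-southeast", "oceania", "middle-east", "africa"]

def pvCodesByScope : PySem.Dict String (PySem.Set String) := PySem.Dict.ofList
  [ ("europe", PySem.Set.ofList
      ["AD", "AL", "AM", "AT", "AZ", "BA", "BE", "BG", "BY", "CH", "CY", "CZ", "DE", "DK", "EE",
       "ES", "FI", "FO", "FR", "GB", "GE", "GG", "GI", "GR", "HR", "HU", "IE", "IM", "IS", "IT",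
       "JE", "KZ", "LI", "LT", "LU", "LV", "MC", "MD", "ME", "MK", "MT", "NL", "NO", "PL", "PT",
       "RO", "RS", "RU", "SE", "SI", "SK", "SM", "TR", "UA", "VA", "XK"]),
    ("north-america", PySem.Set.ofList ["BM", "CA", "GL", "PM", "US"]),
    ("central-america", PySem.Set.ofList ["BZ", "CR", "GT", "HN", "MX", "NI", "PA", "SV"]),
    ("south-america", PySem.Set.ofList
      ["AR", "BO", "BR", "CL", "CO", "EC", "FK", "GF", "GY", "PE", "PY", "SR", "UY", "VE"]),
    ("asia-east", PySem.Set.ofList ["CN", "HK", "JP", "KP", "KR", "MN", "MO", "TW"]),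
    ("asia-south", PySem.Set.ofList ["AF", "BD", "BT", "IN", "IR", "LK", "MV", "NP", "PK"]),
    ("asia-southeast", PySem.Set.ofList
      ["BN", "ID", "KH", "LA", "MM", "MY", "PH", "SG", "TH", "TL", "VN"]),
    ("oceania", PySem.Set.ofList
      ["AS", "AU", "CK", "FJ", "FM", "GU", "KI", "MH", "MP", "NC", "NF", "NR", "NU", "NZ", "PF",
       "PG", "PN", "PW", "SB", "TK", "TO", "TV", "VU", "WF", "WS"]),
    ("middle-east", PySem.Set.ofList
      ["AE", "BH", "CY", "EG", "IL", "IQ", "IR", "JO", "KW", "LB", "OM", "PS", "QA", "SA", "SY", "TR", "YE"]),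
    ("africa", PySem.Set.ofList
      ["AO", "BF", "BI", "BJ", "BW", "CD", "CF", "CG", "CI", "CM", "CV", "DJ", "DZ", "EG", "EH", "ER", "ET", "GA",
       "GH", "GM", "GN", "GQ", "GW", "KE", "KM", "LR", "LS", "LY", "MA", "MG", "ML", "MR", "MU", "MW", "MZ", "NA",
       "NE", "NG", "RE", "RW", "SC", "SD", "SH", "SL", "SN", "SO", "SS", "ST", "SZ", "TD", "TG", "TN", "TZ", "UG",
       "YT", "ZA", "ZM", "ZW"]),
    ("china", PySem.Set.ofList ["CN", "HK", "MO"]) ]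

-- str(country_code or "").strip().upper(): on a String, 'country_code or ""' is the string
-- itself when non-empty and "" when empty, and str() of a str is the identity.
def pvNormalizeCountryCode (country_code : String) : String :=
  PySem.Str.upper (PySem.Str.strip (if country_code == "" then "" else country_code))

def country_strict_geo_buckets_py (country_code : String) : List String :=
  let code := pvNormalizeCountryCode country_code
  if code == "" then PySem.Set.empty
  else
    pvScopes.foldl (fun buckets scope =>
      -- 'COUNTRY_CODES_BY_SCOPE.get(scope) or set()': a falsy value (a missing key) becomes
      -- set(), exactly getD ... Set.empty (no stored set is empty, so 'or' changes nothing else)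
      if PySem.Set.contains (pvCodesByScope.getD scope PySem.Set.empty) code
      then PySem.Set.add buckets scope else buckets) PySem.Set.empty

-- ===== PORT B =====
-- Source B's precomputed literal reverse table GEO_BUCKETS_BY_CODE (code -> scopes, strict order)
def pvBucketsByCode : PySem.Dict String (List String) := PySem.Dict.ofList
  [
    ("AD", ["europe"]),
    ("AE", ["middle-east"]),
    ("AF", ["asia-south"]),
    ("AL", ["europe"]),
    ("AM", ["europe"]),
    ("AO", ["africa"]),
    ("AR", ["south-america"]),
    ("AS", ["oceania"]),
    ("AT", ["europe"]),
    ("AU", ["oceania"]),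
    ("AZ", ["europe"]),
    ("BA", ["europe"]),
    ("BD", ["asia-south"]),
    ("BE", ["europe"]),
    ("BF", ["africa"]),
    ("BG", ["europe"]),
    ("BH", ["middle-east"]),
    ("BI", ["africa"]),
    ("BJ", ["africa"]),
    ("BM", ["north-america"]),
    ("BN", ["asia-southeast"]),
    ("BO", ["south-america"]),
    ("BR", ["south-america"]),
    ("BT", ["asia-south"]),
    ("BW", ["africa"]),
    ("BY", ["europe"]),
    ("BZ", ["central-america"]),
    ("CA", ["north-america"]),
    ("CD", ["africa"]),
    ("CF", ["africa"]),
    ("CG", ["africa"]),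
    ("CH", ["europe"]),
    ("CI", ["africa"]),
    ("CK", ["oceania"]),
    ("CL", ["south-america"]),
    ("CM", ["africa"]),
    ("CN", ["asia-east"]),
    ("CO", ["south-america"]),
    ("CR", ["central-america"]),
    ("CV", ["africa"]),
    ("CY", ["europe", "middle-east"]),
    ("CZ", ["europe"]),
    ("DE", ["europe"]),
    ("DJ", ["africa"]),
    ("DK", ["europe"]),
    ("DZ", ["africa"]),
    ("EC", ["south-america"]),
    ("EE", ["europe"]),
    ("EG", ["middle-east", "africa"]),
    ("EH", ["africa"]),
    ("ER", ["africa"]),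
    ("ES", ["europe"]),
    ("ET", ["africa"]),
    ("FI", ["europe"]),
    ("FJ", ["oceania"]),
    ("FK", ["south-america"]),
    ("FM", ["oceania"]),
    ("FO", ["europe"]),
    ("FR", ["europe"]),
    ("GA", ["africa"]),
    ("GB", ["europe"]),
    ("GE", ["europe"]),
    ("GF", ["south-america"]),
    ("GG", ["europe"]),
    ("GH", ["africa"]),
    ("GI", ["europe"]),
    ("GL", ["north-america"]),
    ("GM", ["africa"]),
    ("GN", ["africa"]),
    ("GQ", ["africa"]),
    ("GR", ["europe"]),
    ("GT", ["central-america"]),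
    ("GU", ["oceania"]),
    ("GW", ["africa"]),
    ("GY", ["south-america"]),
    ("HK", ["asia-east"]),
    ("HN", ["central-america"]),
    ("HR", ["europe"]),
    ("HU", ["europe"]),
    ("ID", ["asia-southeast"]),
    ("IE", ["europe"]),
    ("IL", ["middle-east"]),
    ("IM", ["europe"]),
    ("IN", ["asia-south"]),
    ("IQ", ["middle-east"]),
    ("IR", ["asia-south", "middle-east"]),
    ("IS", ["europe"]),
    ("IT", ["europe"]),
    ("JE", ["europe"]),
    ("JO", ["middle-east"]),
    ("JP", ["asia-east"]),
    ("KE", ["africa"]),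
    ("KH", ["asia-southeast"]),
    ("KI", ["oceania"]),
    ("KM", ["africa"]),
    ("KP", ["asia-east"]),
    ("KR", ["asia-east"]),
    ("KW", ["middle-east"]),
    ("KZ", ["europe"]),
    ("LA", ["asia-southeast"]),
    ("LB", ["middle-east"]),
    ("LI", ["europe"]),
    ("LK", ["asia-south"]),
    ("LR", ["africa"]),
    ("LS", ["africa"]),
    ("LT", ["europe"]),
    ("LU", ["europe"]),
    ("LV", ["europe"]),
    ("LY", ["africa"]),
    ("MA", ["africa"]),
    ("MC", ["europe"]),
    ("MD", ["europe"]),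
    ("ME", ["europe"]),
    ("MG", ["africa"]),
    ("MH", ["oceania"]),
    ("MK", ["europe"]),
    ("ML", ["africa"]),
    ("MM", ["asia-southeast"]),
    ("MN", ["asia-east"]),
    ("MO", ["asia-east"]),
    ("MP", ["oceania"]),
    ("MR", ["africa"]),
    ("MT", ["europe"]),
    ("MU", ["africa"]),
    ("MV", ["asia-south"]),
    ("MW", ["africa"]),
    ("MX", ["central-america"]),
    ("MY", ["asia-southeast"]),
    ("MZ", ["africa"]),
    ("NA", ["africa"]),
    ("NC", ["oceania"]),
    ("NE", ["africa"]),
    ("NF", ["oceania"]),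
    ("NG", ["africa"]),
    ("NI", ["central-america"]),
    ("NL", ["europe"]),
    ("NO", ["europe"]),
    ("NP", ["asia-south"]),
    ("NR", ["oceania"]),
    ("NU", ["oceania"]),
    ("NZ", ["oceania"]),
    ("OM", ["middle-east"]),
    ("PA", ["central-america"]),
    ("PE", ["south-america"]),
    ("PF", ["oceania"]),
    ("PG", ["oceania"]),
    ("PH", ["asia-southeast"]),
    ("PK", ["asia-south"]),
    ("PL", ["europe"]),
    ("PM", ["north-america"]),
    ("PN", ["oceania"]),
    ("PS", ["middle-east"]),
    ("PT", ["europe"]),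
    ("PW", ["oceania"]),
    ("PY", ["south-america"]),
    ("QA", ["middle-east"]),
    ("RE", ["africa"]),
    ("RO", ["europe"]),
    ("RS", ["europe"]),
    ("RU", ["europe"]),
    ("RW", ["africa"]),
    ("SA", ["middle-east"]),
    ("SB", ["oceania"]),
    ("SC", ["africa"]),
    ("SD", ["africa"]),
    ("SE", ["europe"]),
    ("SG", ["asia-southeast"]),
    ("SH", ["africa"]),
    ("SI", ["europe"]),
    ("SK", ["europe"]),
    ("SL", ["africa"]),
    ("SM", ["europe"]),
    ("SN", ["africa"]),
    ("SO", ["africa"]),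
    ("SR", ["south-america"]),
    ("SS", ["africa"]),
    ("ST", ["africa"]),
    ("SV", ["central-america"]),
    ("SY", ["middle-east"]),
    ("SZ", ["africa"]),
    ("TD", ["africa"]),
    ("TG", ["africa"]),
    ("TH", ["asia-southeast"]),
    ("TK", ["oceania"]),
    ("TL", ["asia-southeast"]),
    ("TN", ["africa"]),
    ("TO", ["oceania"]),
    ("TR", ["europe", "middle-east"]),
    ("TV", ["oceania"]),
    ("TW", ["asia-east"]),
    ("TZ", ["africa"]),
    ("UA", ["europe"]),
    ("UG", ["africa"]),
    ("US", ["north-america"]),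
    ("UY", ["south-america"]),
    ("VA", ["europe"]),
    ("VE", ["south-america"]),
    ("VN", ["asia-southeast"]),
    ("VU", ["oceania"]),
    ("WF", ["oceania"]),
    ("WS", ["oceania"]),
    ("XK", ["europe"]),
    ("YE", ["middle-east"]),
    ("YT", ["africa"]),
    ("ZA", ["africa"]),
    ("ZM", ["africa"]),
    ("ZW", ["africa"])
  ]

def country_strict_geo_buckets_py_alt (country_code : String) : List String :=
  let code := PySem.Str.upper (PySem.Str.strip (if country_code == "" then "" else country_code))
  if code == "" then PySem.Set.empty
  else PySem.Set.ofList (pvBucketsByCode.getD code [])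

-- ===== PRECONDITION & SPEC =====
def Spec_country_strict_geo_buckets_py (country_code : String) (out : List String) : Prop := out = country_strict_geo_buckets_py_alt country_code
instance (country_code : String) (out : List String) : Decidable (Spec_country_strict_geo_buckets_py country_code out) := by unfold Spec_country_strict_geo_buckets_py; infer_instance

-- ===== CLAIM (what is proved, stated in full; the proofs are below) =====
def Claim_equal_country_strict_geo_buckets_py : Prop := ∀ (country_code : String), Dom_country_strict_geo_buckets_py country_code → Spec_country_strict_geo_buckets_py country_code (country_strict_geo_buckets_py country_code)

-- ===== LEMMAS AND PROOFS =====

-- A's accumulation loop is 'update init (filter p)'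
theorem pv_foldl_add_filter (p : String → Bool) (l : List String) (init : PySem.Set String) :
    l.foldl (fun b x => if p x then PySem.Set.add b x else b) init
      = PySem.Set.update init (l.filter p) := by
  induction l generalizing init with
  | nil => simp [PySem.Set.update_nil]
  | cons x xs ih =>
    by_cases hx : p x
    · simp [List.foldl_cons, hx, ih, PySem.Set.update_cons]
    · simp [List.foldl_cons, hx, ih]

set_option maxRecDepth 8192 in
set_option maxHeartbeats 2000000 in
-- for every code in the reverse table, A's scope filter equals the table entry
theorem pv_table_hits :
    (pvBucketsByCode.keys.all (fun code =>
      pvScopes.filter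
        (fun scope => PySem.Set.contains (pvCodesByScope.getD scope PySem.Set.empty) code)
        == pvBucketsByCode.getD code [])) = true := by decide

set_option maxRecDepth 8192 in
set_option maxHeartbeats 2000000 in
-- every code occurring in some strict scope's set is a key of the reverse table
theorem pv_table_covers :
    (pvScopes.all (fun scope =>
      (pvCodesByScope.getD scope PySem.Set.empty).all
        (fun c => pvBucketsByCode.contains c))) = true := by decide

-- the reverse-table lookup computes exactly A's scope filter, for EVERY string
theorem pv_lookup_eq_filter (code : String) :
    pvScopes.filter
        (fun scope => PySem.Set.contains (pvCodesByScope.getD scope PySem.Set.empty) code)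
      = pvBucketsByCode.getD code [] := by
  by_cases hc : pvBucketsByCode.contains code = true
  · have hk : code ∈ pvBucketsByCode.keys := (PySem.Dict.contains_iff_mem_keys _ _).mp hc
    exact of_decide_eq_true (by simpa using List.all_eq_true.mp pv_table_hits code hk)
  · rw [PySem.Dict.getD_of_not_contains pvBucketsByCode [] (by simpa using hc)]
    rw [List.filter_eq_nil_iff]
    intro scope hs
    simp only [Bool.not_eq_true]
    by_contra hmem
    have hin : code ∈ (pvCodesByScope.getD scope PySem.Set.empty : List String) :=
      (PySem.Set.contains_iff _ _).mp (by simpa using hmem)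
    have := List.all_eq_true.mp (List.all_eq_true.mp pv_table_covers scope hs) code hin
    exact hc (by simpa using this)

-- ===== VERDICT (by name: the statement is the Claim_ definition above) =====
theorem country_strict_geo_buckets_py_spec : Claim_equal_country_strict_geo_buckets_py := by
  intro country_code _
  show country_strict_geo_buckets_py country_code = country_strict_geo_buckets_py_alt country_code
  unfold country_strict_geo_buckets_py country_strict_geo_buckets_py_alt pvNormalizeCountryCode
  by_cases h :
      (PySem.Str.upper (PySem.Str.strip (if country_code == "" then "" else country_code)) == "") = true
  · rw [if_pos h, if_pos h]
  · rw [if_neg h, if_neg h, pv_foldl_add_filter, ← pv_lookup_eq_filter]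
    simp only [PySem.Set.empty]
    rw [PySem.Set.update_nil_left]
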